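-- pv_equiv track=rewrite | github.com/electronCS/GoTrainer | goTrainer/pattern_search.py | generate_board_with_borders
-- ===== SOURCE A (Python) =====
-- def generate_board_with_borders(size):
--     board = [[0] * (size + 2) for i in range(size + 2)]
--     for i in range(size + 2):
--         board[0][i] = -1
--         board[size + 1][i] = -1
--         board[i][0] = -1
--         board[i][size + 1] = -1
--     return board
-- ===== SOURCE B (Python) =====
-- def generate_board_with_borders(size):
--     n = size + 2
--     if n <= 0:
--         return []
--     border = [-1] * n
--     interior = [-1] + [0] * size + [-1]
--     return [list(border) if i == 0 or i == n - 1 else list(interior) for i in range(n)]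
-- ===== Notes on version B (the rewrite author's own statement) =====
-- stated objective: simpler
-- what changed: Builds each row directly by classifying its index (full -1 border row vs -1/zeros/-1 interior row) in one pass, instead of zero-filling the whole board and then patching the four edges with a second loop of index assignments.
import Mathlib
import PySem

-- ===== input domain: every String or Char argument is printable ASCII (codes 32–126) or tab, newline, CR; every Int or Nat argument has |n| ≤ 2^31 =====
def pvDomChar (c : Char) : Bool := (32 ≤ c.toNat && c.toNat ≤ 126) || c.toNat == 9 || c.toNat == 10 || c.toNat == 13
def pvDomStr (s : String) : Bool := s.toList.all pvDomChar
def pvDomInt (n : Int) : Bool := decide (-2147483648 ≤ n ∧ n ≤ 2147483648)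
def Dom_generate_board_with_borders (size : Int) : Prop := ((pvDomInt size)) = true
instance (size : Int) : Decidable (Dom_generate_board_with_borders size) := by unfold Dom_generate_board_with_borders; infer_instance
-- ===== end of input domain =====

-- B builds each row directly by classifying its index (border row vs interior row)
-- in one pass, instead of A's zero-fill-then-patch-the-four-edges construction.


-- ===== PORT A =====
-- board[i][j] = v  (Python list assignment; in A every index used is nonnegative and
-- in range whenever the loop body executes, so .toNat is exact here)
def pvSetIJ (b : List (List Int)) (i j : Int) (v : Int) : List (List Int) :=
  b.set i.toNat ((b.getD i.toNat []).set j.toNat v)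

def generate_board_with_borders (size : Int) : List (List Int) :=
  let board := (PySem.List.pyRange 0 (size + 2) 1).map
    (fun _ => List.replicate (size + 2).toNat (0 : Int))
  (PySem.List.pyRange 0 (size + 2) 1).foldl
    (fun b i =>
      let b := pvSetIJ b 0 i (-1)
      let b := pvSetIJ b (size + 1) i (-1)
      let b := pvSetIJ b i 0 (-1)
      pvSetIJ b i (size + 1) (-1))
    board

-- ===== PORT B =====
def generate_board_with_borders_alt (size : Int) : List (List Int) :=
  let n := size + 2
  if n ≤ 0 then []
  else
    let border := List.replicate n.toNat (-1 : Int)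
    let interior := [(-1 : Int)] ++ List.replicate size.toNat (0 : Int) ++ [(-1 : Int)]
    (PySem.List.pyRange 0 n 1).map (fun i => if i = 0 ∨ i = n - 1 then border else interior)

-- ===== PRECONDITION & SPEC =====
def Spec_generate_board_with_borders (size : Int) (out : List (List Int)) : Prop := out = generate_board_with_borders_alt size
instance (size : Int) (out : List (List Int)) : Decidable (Spec_generate_board_with_borders size out) := by unfold Spec_generate_board_with_borders; infer_instance

-- ===== CLAIM (what is proved, stated in full; the proofs are below) =====
def Claim_equal_generate_board_with_borders : Prop := ∀ (size : Int), Dom_generate_board_with_borders size → Spec_generate_board_with_borders size (generate_board_with_borders size)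

-- ===== LEMMAS AND PROOFS =====

-- the intended cell value after the first k iterations of A's patch loop
def pvCell (n k r c : Nat) : Int :=
  if ((r = 0 ∨ r = n - 1) ∧ c < k) ∨ ((c = 0 ∨ c = n - 1) ∧ r < k) then -1 else 0

def pvInv (n k : Nat) : List (List Int) :=
  (List.range n).map (fun r => (List.range n).map (pvCell n k r))

lemma pvSetIJ_map (n : Nat) (f : Nat → Nat → Int) (i j : Nat) (hi : i < n) (_hj : j < n)
    (v : Int) :
    pvSetIJ ((List.range n).map fun r => (List.range n).map (f r)) (i : Int) (j : Int) v
      = (List.range n).map fun r => (List.range n).map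
          (fun c => if r = i ∧ c = j then v else f r c) := by
  unfold pvSetIJ
  simp only [Int.toNat_natCast]
  apply List.ext_getElem
  · simp
  intro r h1 h2
  have hr : r < n := by simpa using h2
  by_cases hri : i = r
  · subst hri
    rw [List.getElem_set_self, List.getD_eq_getElem _ _ (by simpa using hi)]
    simp only [List.getElem_map, List.getElem_range]
    apply List.ext_getElem
    · simp
    intro c hc1 hc2
    by_cases hcj : j = c
    · subst hcj
      rw [List.getElem_set_self]
      simp
    · rw [List.getElem_set_ne hcj]
      simp only [List.getElem_map, List.getElem_range]
      rw [if_neg (fun h => hcj h.2.symm)]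
  · rw [List.getElem_set_ne hri]
    simp only [List.getElem_map, List.getElem_range]
    apply List.map_congr_left
    intro c _
    rw [if_neg (fun h => hri h.1.symm)]

lemma pvInv_zero (n : Nat) :
    (List.range n).map (fun _r => (List.range n).map (fun _ => (0 : Int))) = pvInv n 0 := by
  unfold pvInv
  apply List.map_congr_left
  intro r _
  apply List.map_congr_left
  intro c _
  simp [pvCell]

lemma pvStep (n k : Nat) (hk : k < n) :
    pvSetIJ (pvSetIJ (pvSetIJ (pvSetIJ (pvInv n k) 0 (k : Int) (-1))
        ((n : Int) - 1) (k : Int) (-1)) (k : Int) 0 (-1)) (k : Int) ((n : Int) - 1) (-1)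
      = pvInv n (k + 1) := by
  have hn1 : n - 1 < n := by omega
  have h0 : (0 : Int) = ((0 : Nat) : Int) := by simp
  have hc : ((n : Int) - 1) = ((n - 1 : Nat) : Int) := by omega
  unfold pvInv
  rw [h0, hc, pvSetIJ_map n _ 0 k (by omega) hk,
      pvSetIJ_map n _ (n - 1) k hn1 hk,
      pvSetIJ_map n _ k 0 hk (by omega),
      pvSetIJ_map n _ k (n - 1) hk hn1]
  apply List.map_congr_left
  intro r hr
  apply List.map_congr_left
  intro c hc2
  simp only [List.mem_range] at hr hc2
  simp only [pvCell]
  split_ifs <;> omega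

lemma pvFold (n : Nat) (k : Nat) (hk : k ≤ n) (size : Int) (hsz : size + 2 = (n : Int)) :
    (PySem.List.pyRange 0 (k : Int) 1).foldl
      (fun b i =>
        let b := pvSetIJ b 0 i (-1)
        let b := pvSetIJ b (size + 1) i (-1)
        let b := pvSetIJ b i 0 (-1)
        pvSetIJ b i (size + 1) (-1))
      (pvInv n 0) = pvInv n k := by
  induction k with
  | zero => simp [PySem.List.pyRange_one_eq_nil]
  | succ k ih =>
    have hk' : k ≤ n := by omega
    have : ((k + 1 : Nat) : Int) = (k : Int) + 1 := by push_cast; ring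
    rw [this, PySem.List.pyRange_one_succ_right (by positivity), List.foldl_append, ih hk']
    simp only [List.foldl_cons, List.foldl_nil]
    have hs1 : size + 1 = (n : Int) - 1 := by omega
    rw [hs1]
    exact pvStep n k (by omega)

lemma pvAltRow_border (n : Nat) (r : Nat) (hr : r < n) (hb : r = 0 ∨ r = n - 1) :
    List.replicate n (-1 : Int) = (List.range n).map (pvCell n n r) := by
  apply List.ext_getElem
  · simp
  intro c h1 h2
  have hcn : c < n := by simpa using h1
  simp only [List.getElem_replicate, List.getElem_map, List.getElem_range, pvCell]
  rw [if_pos (by omega)]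

lemma pvAltRow_interior (n : Nat) (r : Nat) (hr : r < n) (hb : ¬(r = 0 ∨ r = n - 1)) :
    [(-1 : Int)] ++ List.replicate (n - 2) (0 : Int) ++ [(-1 : Int)]
      = (List.range n).map (pvCell n n r) := by
  have hn2 : 2 ≤ n := by omega
  apply List.ext_getElem
  · simp; omega
  intro c h1 h2
  have hcn : c < n := by simpa using h2
  simp only [List.getElem_map, List.getElem_range, pvCell]
  by_cases hc0 : c = 0
  · subst hc0
    simp only [List.cons_append, List.getElem_cons_zero]
    rw [if_pos (Or.inr ⟨Or.inl trivial, hr⟩)]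
  · by_cases hcl : c = n - 1
    · rw [List.getElem_append_right (by simp; omega)]
      simp only [List.length_append, List.length_cons, List.length_replicate,
        List.length_nil, List.getElem_singleton]
      rw [if_pos (by omega)]
    · rw [List.getElem_append_left (by simp; omega),
        List.getElem_append_right (by simp; omega)]
      simp only [List.length_singleton, List.getElem_replicate]
      rw [if_neg]; omega

-- ===== VERDICT (by name: the statement is the Claim_ definition above) =====
theorem generate_board_with_borders_spec : Claim_equal_generate_board_with_borders := by
  intro size _
  show generate_board_with_borders size = generate_board_with_borders_alt size
  unfold generate_board_with_borders generate_board_with_borders_alt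
  by_cases hneg : size + 2 ≤ 0
  · simp [PySem.List.pyRange_one_eq_nil hneg, hneg]
  · rw [if_neg hneg]
    set n : Nat := (size + 2).toNat with hn
    have hsz : size + 2 = (n : Int) := by omega
    have hn1 : 1 ≤ n := by omega
    have hinit :
        (PySem.List.pyRange 0 (size + 2) 1).map
            (fun _ => List.replicate (size + 2).toNat (0 : Int)) = pvInv n 0 := by
      rw [hsz, PySem.List.pyRange_zero_natCast, ← pvInv_zero]
      simp only [List.map_map, Int.toNat_natCast]
      apply List.map_congr_left
      intro r _
      simp [List.map_const']
    rw [hinit, hsz, pvFold n n le_rfl size hsz]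
    rw [PySem.List.pyRange_zero_natCast]
    unfold pvInv
    rw [List.map_map]
    apply List.map_congr_left
    intro r hr
    simp only [List.mem_range] at hr
    simp only [Function.comp]
    have hrc : ((r : Int) = 0 ∨ (r : Int) = (n : Int) - 1) ↔ (r = 0 ∨ r = n - 1) := by omega
    by_cases hb : r = 0 ∨ r = n - 1
    · rw [if_pos (hrc.mpr hb)]
      exact (pvAltRow_border n r hr hb).symm
    · rw [if_neg (fun h => hb (hrc.mp h))]
      have h2 : size.toNat = n - 2 := by omega
      rw [h2]
      exact (pvAltRow_interior n r hr hb).symm
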